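-- pv_equiv track=rewrite | github.com/kmoketo-dev/find-the-enemy | problem_coderbyte.py | find_closest_enemy
-- ===== SOURCE A (Python) =====
-- def find_closest_enemy(game_grid):
--     num_rows = len(game_grid)
--     num_cols = len(game_grid[0]) if num_rows > 0 else 0
--
--     player_position = None
--     enemy_positions = []
--
--     for row in range(num_rows):
--         for col in range(num_cols):
--             if game_grid[row][col] == 1:
--                 player_position = (row, col)
--             elif game_grid[row][col] == 2:
--                 enemy_positions.append((row, col))
--
--     if not enemy_positions:
--         return 0
--
--     distances_to_enemies = []
--
--     for enemy_position in enemy_positions: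
--
--         direct_horizontal_dist = abs(player_position[1] - enemy_position[1])
--         wrapped_horizontal_dist = num_cols - direct_horizontal_dist
--         min_horizontal_dist = min(direct_horizontal_dist, wrapped_horizontal_dist)
--
--         direct_vertical_dist = abs(player_position[0] - enemy_position[0])
--         wrapped_vertical_dist = num_rows - direct_vertical_dist
--         min_vertical_dist = min(direct_vertical_dist, wrapped_vertical_dist)
--
--         total_distance = min_horizontal_dist + min_vertical_dist
--         distances_to_enemies.append(total_distance)
--
--     return min(distances_to_enemies)
-- ===== SOURCE B (Python) =====
-- def find_closest_enemy(game_grid):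
--     R = len(game_grid)
--     C = len(game_grid[0]) if R > 0 else 0
--
--     player_position = None
--     has_enemy = False
--     for r in range(R):
--         for c in range(C):
--             v = game_grid[r][c]
--             if v == 1:
--                 player_position = (r, c)
--             elif v == 2:
--                 has_enemy = True
--
--     if not has_enemy:
--         return 0
--
--     pr, pc = player_position
--
--     # Expand rings outward from the player: at radius d probe the (up to 4)
--     # toroidal cells at each offset split (i, d - i); the first radius that
--     # probes an enemy cell is the answer.
--     for d in range(R + C + 1):
--         for i in range(d + 1):
--             j = d - i
--             for rr in ((pr + i) % R, (pr - i) % R):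
--                 for cc in ((pc + j) % C, (pc - j) % C):
--                     if game_grid[rr][cc] == 2:
--                         return d
-- ===== Notes on version B (the rewrite author's own statement) =====
-- stated objective: alternative
-- what changed: B never computes per-enemy distances or a minimum: after one scan for the player and an any-enemy flag, it searches outward from the player ring by ring, probing the up-to-4 toroidal cells at each offset split (i, d-i) of radius d and returning the first radius whose probe lands on a 2.
import Mathlib
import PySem

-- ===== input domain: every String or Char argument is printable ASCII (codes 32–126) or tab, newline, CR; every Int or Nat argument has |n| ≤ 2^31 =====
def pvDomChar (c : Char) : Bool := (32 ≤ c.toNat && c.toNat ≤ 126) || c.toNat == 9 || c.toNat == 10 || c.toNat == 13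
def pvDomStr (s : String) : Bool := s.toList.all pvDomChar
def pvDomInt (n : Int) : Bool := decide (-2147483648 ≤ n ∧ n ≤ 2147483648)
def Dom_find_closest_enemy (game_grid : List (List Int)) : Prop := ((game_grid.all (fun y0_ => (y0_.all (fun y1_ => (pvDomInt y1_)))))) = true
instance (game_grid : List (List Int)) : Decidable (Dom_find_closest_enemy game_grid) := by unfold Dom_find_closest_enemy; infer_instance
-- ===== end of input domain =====

-- B drops A's per-enemy distance list and min entirely: it searches outward from the
-- player ring by ring, probing the toroidal cells at each offset split of radius d and
-- returning the first radius whose probe hits an enemy (objective: alternative algorithm).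

-- ===== PORT A =====
-- Literal port of A. game_grid[row][col] is written with getD; out-of-range access (ragged
-- rows) and player_position[i] on None (enemies but no player) raise in Python and are
-- excluded by Pre_, where the getD defaults are never semantically relevant.
-- A-side helper: A's scanning double loop (named so the proofs can refer to it)
def pvScanA (game_grid : List (List Int)) (num_rows num_cols : Nat) :
    Option (Nat × Nat) × List (Nat × Nat) :=
  (List.range num_rows).foldl (fun st row =>
    (List.range num_cols).foldl (fun st col =>
      let v := (game_grid.getD row []).getD col 0
      if v = 1 then ((some (row, col) : Option (Nat × Nat)), st.2)
      else if v = 2 then (st.1, st.2 ++ [(row, col)])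
      else st) st)
    ((none : Option (Nat × Nat)), ([] : List (Nat × Nat)))

def find_closest_enemy (game_grid : List (List Int)) : Int :=
  let num_rows := game_grid.length
  let num_cols := if num_rows > 0 then game_grid.headI.length else 0
  let scan := pvScanA game_grid num_rows num_cols
  if scan.2 = [] then 0
  else
    let player := scan.1.getD (0, 0)  -- Python: TypeError if None; excluded by Pre_
    let distances := scan.2.map (fun e =>
      let direct_h : Int := |(player.2 : Int) - (e.2 : Int)|
      let wrapped_h : Int := (num_cols : Int) - direct_h
      let min_h := min direct_h wrapped_h
      let direct_v : Int := |(player.1 : Int) - (e.1 : Int)|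
      let wrapped_v : Int := (num_rows : Int) - direct_v
      let min_v := min direct_v wrapped_v
      min_h + min_v)
    (PySem.List.min? distances (fun x => x)).getD 0

-- ===== PORT B =====
-- Literal port of Source B (same getD convention; indices produced by '% R'/'% C' are
-- nonnegative ints in Python, hence the .toNat after PySem.Int.mod is exact there).
-- B-side helper: Source B's scan for the (last) player and the any-enemy flag
def pvScanB (game_grid : List (List Int)) (num_rows num_cols : Nat) :
    Option (Nat × Nat) × Bool :=
  (List.range num_rows).foldl (fun st r =>
    (List.range num_cols).foldl (fun st c =>
      let v := (game_grid.getD r []).getD c 0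
      if v = 1 then ((some (r, c) : Option (Nat × Nat)), st.2)
      else if v = 2 then (st.1, true)
      else st) st)
    ((none : Option (Nat × Nat)), false)

-- B-side helper: the probe of radius d — Source B's three inner loops of the search
def pvRingHit (game_grid : List (List Int)) (R C : Nat) (pr pc : Nat) (d : Nat) : Bool :=
  (List.range (d + 1)).any (fun i =>
    let j := d - i
    ([PySem.Int.mod ((pr : Int) + (i : Int)) (R : Int),
      PySem.Int.mod ((pr : Int) - (i : Int)) (R : Int)]).any (fun rr =>
      ([PySem.Int.mod ((pc : Int) + (j : Int)) (C : Int),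
        PySem.Int.mod ((pc : Int) - (j : Int)) (C : Int)]).any (fun cc =>
        (game_grid.getD rr.toNat []).getD cc.toNat 0 == 2)))

def find_closest_enemy_alt (game_grid : List (List Int)) : Int :=
  let R := game_grid.length
  let C := if R > 0 then game_grid.headI.length else 0
  let scan := pvScanB game_grid R C
  if scan.2 = false then 0
  else
    let p := scan.1.getD (0, 0)  -- Python: TypeError if None; excluded by Pre_
    match (List.range (R + C + 1)).find? (fun d => pvRingHit game_grid R C p.1 p.2 d) with
    | some d => (d : Int)
    | none => 0  -- Python: falls off the loop (returns None); unreachable when an enemy exists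

-- ===== PRECONDITION & SPEC =====
-- Pre_ excludes exactly the inputs on which the Python A raises: ragged grids with a row
-- shorter than row 0 (IndexError) and grids containing an enemy in the scanned region but
-- no player there (TypeError on player_position[1]).
def Pre_find_closest_enemy (game_grid : List (List Int)) : Prop :=
  (∀ row ∈ game_grid, game_grid.headI.length ≤ row.length) ∧
  ((∃ r ∈ List.range game_grid.length, ∃ c ∈ List.range game_grid.headI.length,
      (game_grid.getD r []).getD c 0 = 2) →
   (∃ r ∈ List.range game_grid.length, ∃ c ∈ List.range game_grid.headI.length,
      (game_grid.getD r []).getD c 0 = 1))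
instance (game_grid : List (List Int)) : Decidable (Pre_find_closest_enemy game_grid) := by
  unfold Pre_find_closest_enemy; infer_instance

def pvWitness_find_closest_enemy : List (List Int) := [[1, 0], [0, 2]]

def Spec_find_closest_enemy (game_grid : List (List Int)) (out : Int) : Prop := out = find_closest_enemy_alt game_grid
instance (game_grid : List (List Int)) (out : Int) : Decidable (Spec_find_closest_enemy game_grid out) := by unfold Spec_find_closest_enemy; infer_instance

-- ===== CLAIM (what is proved, stated in full; the proofs are below) =====
def Claim_equal_find_closest_enemy : Prop := ∀ (game_grid : List (List Int)), Dom_find_closest_enemy game_grid → Pre_find_closest_enemy game_grid → Spec_find_closest_enemy game_grid (find_closest_enemy game_grid)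

-- ===== LEMMAS AND PROOFS =====

-- grid value at a cell
def pvG (g : List (List Int)) (p : Nat × Nat) : Int := (g.getD p.1 []).getD p.2 0

-- the row-major cell list both scans traverse
def pvCellsB (R C : Nat) : List (Nat × Nat) :=
  (List.range R).flatMap (fun r => (List.range C).map (fun c => (r, c)))

-- A's expression for the toroidal distance from p to e
def pvDist (R C : Nat) (p e : Nat × Nat) : Int :=
  min (|(p.2 : Int) - (e.2 : Int)|) ((C : Int) - |(p.2 : Int) - (e.2 : Int)|)
  + min (|(p.1 : Int) - (e.1 : Int)|) ((R : Int) - |(p.1 : Int) - (e.1 : Int)|)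

lemma mem_pvCellsB {R C : Nat} {p : Nat × Nat} :
    p ∈ pvCellsB R C ↔ p.1 < R ∧ p.2 < C := by
  cases p with
  | mk a b =>
    simp [pvCellsB, List.mem_flatMap, List.mem_map, List.mem_range]

-- a nested range loop is the fold over the row-major cell list
lemma foldl_nested_range {σ : Type} (C : Nat) (φ : σ → Nat × Nat → σ) :
    ∀ (L : List Nat) (init : σ),
      L.foldl (fun st r => (List.range C).foldl (fun st c => φ st (r, c)) st) init
      = (L.flatMap (fun r => (List.range C).map (fun c => (r, c)))).foldl φ init := by
  intro L
  induction L with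
  | nil => intro init; simp
  | cons r t ih =>
      intro init
      simp [List.flatMap_cons, List.foldl_append, List.foldl_map, ih]

-- A's scan fold, characterised: the player is the last 1-cell, the enemies are the 2-cells
lemma scanA_char (g : List (List Int)) :
    ∀ (cells : List (Nat × Nat)) (pp : Option (Nat × Nat)) (es : List (Nat × Nat)),
      cells.foldl (fun st p =>
          if pvG g p = 1 then ((some p : Option (Nat × Nat)), st.2)
          else if pvG g p = 2 then (st.1, st.2 ++ [p])
          else st) (pp, es)
      = (cells.foldl (fun acc p => if pvG g p = 1 then some p else acc) pp,
         es ++ cells.filter (fun p => pvG g p == 2)) := by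
  intro cells
  induction cells with
  | nil => intro pp es; simp
  | cons p t ih =>
      intro pp es
      by_cases h1 : pvG g p = 1
      · have h2 : ¬ pvG g p = 2 := by rw [h1]; decide
        simp [List.foldl_cons, h1, ih]
      · by_cases h2 : pvG g p = 2
        · simp [List.foldl_cons, h2, List.filter_cons, ih, List.append_assoc]
        · simp [List.foldl_cons, h1, h2, ih]

-- B's scan fold, characterised: same last-1 player, any-2 flag
lemma scanB_char (g : List (List Int)) :
    ∀ (cells : List (Nat × Nat)) (pp : Option (Nat × Nat)) (b : Bool),
      cells.foldl (fun st p =>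
          if pvG g p = 1 then ((some p : Option (Nat × Nat)), st.2)
          else if pvG g p = 2 then (st.1, true)
          else st) (pp, b)
      = (cells.foldl (fun acc p => if pvG g p = 1 then some p else acc) pp,
         b || cells.any (fun p => pvG g p == 2)) := by
  intro cells
  induction cells with
  | nil => intro pp b; simp
  | cons p t ih =>
      intro pp b
      by_cases h1 : pvG g p = 1
      · have h2 : ¬ pvG g p = 2 := by rw [h1]; decide
        simp [List.foldl_cons, List.any_cons, h1, h2, ih]
      · by_cases h2 : pvG g p = 2
        · simp [List.foldl_cons, List.any_cons, h1, h2, ih]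
        · have h2' : (pvG g p == 2) = false := by simp [h2]
          simp [List.foldl_cons, List.any_cons, h1, h2, h2', ih]

-- the last-1 fold is the head of the reversed filtered list
lemma lastfold_eq_rev_head (g : List (List Int)) :
    ∀ (cells : List (Nat × Nat)) (pp : Option (Nat × Nat)),
      cells.foldl (fun acc p => if pvG g p = 1 then some p else acc) pp
      = ((cells.reverse.filter (fun p => pvG g p == 1)).head?).or pp := by
  intro cells
  induction cells with
  | nil => intro pp; simp
  | cons p t ih =>
      intro pp
      rw [List.foldl_cons, ih]
      simp only [List.reverse_cons, List.filter_append, List.head?_append]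
      by_cases h1 : pvG g p = 1
      · simp [h1, Option.or_assoc]
      · simp [h1]

lemma emod_small (x n : Int) (hn : 0 < n) (h1 : -n < x) (h2 : x < n) :
    x % n = if 0 ≤ x then x else x + n := by
  split
  · exact Int.emod_eq_of_lt ‹_› h2
  · have hx : (x + n) % n = x % n := by
      simpa using Int.add_mul_emod_self_left (a := x) (b := n) (c := 1)
    rw [← hx, Int.emod_eq_of_lt (by omega) (by omega)]

lemma emod_le_self (i n : Int) (hi : 0 ≤ i) (hn : 0 < n) : i % n ≤ i := by
  have h1 : 0 ≤ i / n := Int.ediv_nonneg hi hn.le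
  have h2 := Int.emod_add_ediv i n
  have h3 : 0 ≤ n * (i / n) := mul_nonneg hn.le h1
  linarith

-- pointwise distance identity: modular distance = direct/wrapped minimum
lemma dist_eq (n a b : Nat) (ha : a < n) (hb : b < n) :
    min (((a : Int) - b) % n) (((b : Int) - a) % n)
    = min (|(b : Int) - a|) ((n : Int) - |(b : Int) - a|) := by
  have hn : (0 : Int) < n := by omega
  have hb1 : ((b : Int)) < n := by exact_mod_cast hb
  have ha1 : ((a : Int)) < n := by exact_mod_cast ha
  have ha0 : (0 : Int) ≤ a := Int.natCast_nonneg a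
  have hb0 : (0 : Int) ≤ b := Int.natCast_nonneg b
  rw [emod_small _ _ hn (by omega) (by omega), emod_small _ _ hn (by omega) (by omega)]
  rcases abs_cases ((b : Int) - a) with ⟨he, hs⟩ | ⟨he, hs⟩ <;> rw [he] <;>
    split_ifs <;> omega

-- shifting by the modular offset lands on the target (plus form)
lemma mod_shift_add (p e n : Int) (hn : 0 < n) (he0 : 0 ≤ e) (he1 : e < n) :
    (p + (e - p) % n) % n = e := by
  rw [Int.add_emod, Int.emod_emod_of_dvd _ dvd_rfl, ← Int.add_emod]
  simpa using Int.emod_eq_of_lt he0 he1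

-- shifting by the modular offset lands on the target (minus form)
lemma mod_shift_sub (p e n : Int) (hn : 0 < n) (he0 : 0 ≤ e) (he1 : e < n) :
    (p - (p - e) % n) % n = e := by
  rw [Int.sub_emod, Int.emod_emod_of_dvd _ dvd_rfl, ← Int.sub_emod]
  simpa using Int.emod_eq_of_lt he0 he1

-- a probed row/column is at modular distance ≤ the offset used to probe it
lemma mod_dist_le_add (p n : Int) (i : Nat) (hn : 0 < n) :
    ((p + (i : Int)) % n - p) % n ≤ (i : Int) := by
  have : ((p + (i : Int)) % n - p) % n = (i : Int) % n := by
    rw [Int.sub_emod, Int.emod_emod_of_dvd _ dvd_rfl, ← Int.sub_emod]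
    ring_nf
  rw [this]
  exact emod_le_self _ _ (Int.natCast_nonneg i) hn

lemma mod_dist_le_sub (p n : Int) (i : Nat) (hn : 0 < n) :
    (p - (p - (i : Int)) % n) % n ≤ (i : Int) := by
  have : (p - (p - (i : Int)) % n) % n = (i : Int) % n := by
    rw [Int.sub_emod, Int.emod_emod_of_dvd _ dvd_rfl, ← Int.sub_emod]
    ring_nf
  rw [this]
  exact emod_le_self _ _ (Int.natCast_nonneg i) hn

-- find? over a range returns the least index satisfying the predicate
lemma find?_range_least :
    ∀ (N : Nat) (p : Nat → Bool) (k : Nat), k < N → p k = true → (∀ d, d < k → p d = false) →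
      (List.range N).find? p = some k := by
  intro N
  induction N with
  | zero => intro p k hk; omega
  | succ n ih =>
      intro p k hk hp hleast
      rw [List.range_succ_eq_map]
      by_cases h0 : p 0 = true
      · have hk0 : k = 0 := by
          by_contra hne
          have := hleast 0 (Nat.pos_of_ne_zero hne)
          rw [this] at h0; exact absurd h0 (by simp)
        subst hk0
        simp [List.find?_cons, h0]
      · have hp0 : p 0 = false := by
          cases hx : p 0 with
          | false => rfl
          | true => exact absurd hx h0
        have hkne : k ≠ 0 := by intro h; subst h; rw [hp] at hp0; cases hp0
        obtain ⟨k', rfl⟩ := Nat.exists_eq_succ_of_ne_zero hkne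
        rw [List.find?_cons_of_neg (by simp [hp0]), List.find?_map]
        have := ih (p ∘ Nat.succ) k' (by omega) (by simpa using hp)
          (fun d hd => by simpa using hleast (d + 1) (by omega))
        rw [this]
        rfl

-- the scans, in characterised form
lemma scanA_spec (g : List (List Int)) (R C : Nat) :
    pvScanA g R C
    = ((pvCellsB R C).foldl (fun acc p => if pvG g p = 1 then some p else acc) none,
       (pvCellsB R C).filter (fun p => pvG g p == 2)) := by
  refine Eq.trans ?_ (by simpa using scanA_char g (pvCellsB R C) none [])
  exact foldl_nested_range (σ := Option (Nat × Nat) × List (Nat × Nat)) C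
    (fun st p =>
      if pvG g p = 1 then ((some p : Option (Nat × Nat)), st.2)
      else if pvG g p = 2 then (st.1, st.2 ++ [p])
      else st) (List.range R) ((none : Option (Nat × Nat)), ([] : List (Nat × Nat)))

lemma scanB_spec (g : List (List Int)) (R C : Nat) :
    pvScanB g R C
    = ((pvCellsB R C).foldl (fun acc p => if pvG g p = 1 then some p else acc) none,
       (pvCellsB R C).any (fun p => pvG g p == 2)) := by
  refine Eq.trans ?_ (by simpa using scanB_char g (pvCellsB R C) none false)
  exact foldl_nested_range (σ := Option (Nat × Nat) × Bool) C
    (fun st p =>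
      if pvG g p = 1 then ((some p : Option (Nat × Nat)), st.2)
      else if pvG g p = 2 then (st.1, true)
      else st) (List.range R) ((none : Option (Nat × Nat)), false)

lemma pvDist_bounds (R C : Nat) (p e : Nat × Nat)
    (hp1 : p.1 < R) (hp2 : p.2 < C) (he1 : e.1 < R) (he2 : e.2 < C) :
    0 ≤ pvDist R C p e ∧ pvDist R C p e ≤ (R : Int) + C := by
  have ha1 := abs_cases ((p.1 : Int) - (e.1 : Int))
  have ha2 := abs_cases ((p.2 : Int) - (e.2 : Int))
  unfold pvDist
  rcases min_cases (|(p.2 : Int) - (e.2 : Int)|) ((C : Int) - |(p.2 : Int) - (e.2 : Int)|) with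
      ⟨hm2, _⟩ | ⟨hm2, _⟩ <;>
    rcases min_cases (|(p.1 : Int) - (e.1 : Int)|) ((R : Int) - |(p.1 : Int) - (e.1 : Int)|) with
        ⟨hm1, _⟩ | ⟨hm1, _⟩ <;>
      rw [hm1, hm2] <;> rcases ha1 with ⟨hc1, _⟩ | ⟨hc1, _⟩ <;>
        rcases ha2 with ⟨hc2, _⟩ | ⟨hc2, _⟩ <;> constructor <;> omega

-- probing at radius pvDist from an enemy cell hits it
lemma hit_of_enemy (g : List (List Int)) (R C : Nat) (p e : Nat × Nat)
    (hp1 : p.1 < R) (hp2 : p.2 < C) (he1 : e.1 < R) (he2 : e.2 < C)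
    (hval : pvG g e = 2) :
    pvRingHit g R C p.1 p.2 (pvDist R C p e).toNat = true := by
  have hR : (0 : Int) < R := by omega
  have hC : (0 : Int) < C := by omega
  set vmod : Int := min (((e.1 : Int) - p.1) % R) (((p.1 : Int) - e.1) % R) with hvmod
  set hmod : Int := min (((e.2 : Int) - p.2) % C) (((p.2 : Int) - e.2) % C) with hhmod
  have hveq : vmod = min (|(p.1 : Int) - (e.1 : Int)|) ((R : Int) - |(p.1 : Int) - (e.1 : Int)|) :=
    dist_eq R e.1 p.1 he1 hp1
  have hheq : hmod = min (|(p.2 : Int) - (e.2 : Int)|) ((C : Int) - |(p.2 : Int) - (e.2 : Int)|) :=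
    dist_eq C e.2 p.2 he2 hp2
  have hdist : pvDist R C p e = hmod + vmod := by rw [pvDist, hveq, hheq]
  have hv0 : 0 ≤ vmod := le_min (Int.emod_nonneg _ (by omega)) (Int.emod_nonneg _ (by omega))
  have hh0 : 0 ≤ hmod := le_min (Int.emod_nonneg _ (by omega)) (Int.emod_nonneg _ (by omega))
  unfold pvRingHit
  refine List.any_eq_true.mpr ⟨vmod.toNat, List.mem_range.mpr (by omega), ?_⟩
  simp only []
  have hj : (pvDist R C p e).toNat - vmod.toNat = hmod.toNat := by omega
  rw [hj]
  have hrr : PySem.Int.mod ((p.1 : Int) + (vmod.toNat : Int)) R = (e.1 : Int) ∨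
             PySem.Int.mod ((p.1 : Int) - (vmod.toNat : Int)) R = (e.1 : Int) := by
    rw [Int.toNat_of_nonneg hv0, PySem.Int.mod_eq_emod_of_pos hR, PySem.Int.mod_eq_emod_of_pos hR]
    rcases le_total (((e.1 : Int) - p.1) % R) (((p.1 : Int) - e.1) % R) with h | h
    · left
      rw [hvmod, min_eq_left h]
      exact mod_shift_add _ _ _ hR (by omega) (by omega)
    · right
      rw [hvmod, min_eq_right h]
      exact mod_shift_sub _ _ _ hR (by omega) (by omega)
  have hcc : PySem.Int.mod ((p.2 : Int) + (hmod.toNat : Int)) C = (e.2 : Int) ∨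
             PySem.Int.mod ((p.2 : Int) - (hmod.toNat : Int)) C = (e.2 : Int) := by
    rw [Int.toNat_of_nonneg hh0, PySem.Int.mod_eq_emod_of_pos hC, PySem.Int.mod_eq_emod_of_pos hC]
    rcases le_total (((e.2 : Int) - p.2) % C) (((p.2 : Int) - e.2) % C) with h | h
    · left
      rw [hhmod, min_eq_left h]
      exact mod_shift_add _ _ _ hC (by omega) (by omega)
    · right
      rw [hhmod, min_eq_right h]
      exact mod_shift_sub _ _ _ hC (by omega) (by omega)
  have hget : (g.getD ((e.1 : Int)).toNat []).getD ((e.2 : Int)).toNat 0 == 2 := by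
    simpa [pvG] using hval
  simp only [List.any_cons, List.any_nil, Bool.or_false, Bool.or_eq_true]
  rcases hrr with h | h <;> rcases hcc with h2 | h2
  · exact Or.inl (Or.inl (by rw [h, h2]; exact hget))
  · exact Or.inl (Or.inr (by rw [h, h2]; exact hget))
  · exact Or.inr (Or.inl (by rw [h, h2]; exact hget))
  · exact Or.inr (Or.inr (by rw [h, h2]; exact hget))

-- any probe that hits an enemy at radius d bounds its toroidal distance by d
lemma enemy_of_hit (g : List (List Int)) (R C : Nat) (p : Nat × Nat) (d : Nat)
    (hp1 : p.1 < R) (hp2 : p.2 < C)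
    (hhit : pvRingHit g R C p.1 p.2 d = true) :
    ∃ e : Nat × Nat, e.1 < R ∧ e.2 < C ∧ pvG g e = 2 ∧ pvDist R C p e ≤ (d : Int) := by
  have hR : (0 : Int) < R := by omega
  have hC : (0 : Int) < C := by omega
  unfold pvRingHit at hhit
  obtain ⟨i, hi, hrest⟩ := List.any_eq_true.mp hhit
  rw [List.mem_range] at hi
  simp only [] at hrest
  obtain ⟨rr, hrrmem, hrest2⟩ := List.any_eq_true.mp hrest
  obtain ⟨cc, hccmem, hvalb⟩ := List.any_eq_true.mp hrest2
  -- bounds on the probed coordinates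
  have hrr0 : 0 ≤ rr ∧ rr < (R : Int) := by
    rcases List.mem_pair.mp hrrmem with h | h <;> subst h <;>
      rw [PySem.Int.mod_eq_emod_of_pos hR] <;>
        exact ⟨Int.emod_nonneg _ (by omega), Int.emod_lt_of_pos _ hR⟩
  have hcc0 : 0 ≤ cc ∧ cc < (C : Int) := by
    rcases List.mem_pair.mp hccmem with h | h <;> subst h <;>
      rw [PySem.Int.mod_eq_emod_of_pos hC] <;>
        exact ⟨Int.emod_nonneg _ (by omega), Int.emod_lt_of_pos _ hC⟩
  refine ⟨(rr.toNat, cc.toNat), by omega, by omega, by simpa [pvG] using hvalb, ?_⟩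
  -- the modular distances are bounded by the offsets used
  have hrcast : ((rr.toNat : Int)) = rr := Int.toNat_of_nonneg hrr0.1
  have hccast : ((cc.toNat : Int)) = cc := Int.toNat_of_nonneg hcc0.1
  have hv : min ((rr - (p.1 : Int)) % R) (((p.1 : Int) - rr) % R) ≤ (i : Int) := by
    rcases List.mem_pair.mp hrrmem with h | h <;> subst h <;>
      rw [PySem.Int.mod_eq_emod_of_pos hR]
    · exact le_trans (min_le_left _ _) (mod_dist_le_add _ _ _ hR)
    · exact le_trans (min_le_right _ _) (mod_dist_le_sub _ _ _ hR)
  have hh : min ((cc - (p.2 : Int)) % C) (((p.2 : Int) - cc) % C) ≤ ((d - i : Nat) : Int) := by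
    rcases List.mem_pair.mp hccmem with h | h <;> subst h <;>
      rw [PySem.Int.mod_eq_emod_of_pos hC]
    · exact le_trans (min_le_left _ _) (mod_dist_le_add _ _ _ hC)
    · exact le_trans (min_le_right _ _) (mod_dist_le_sub _ _ _ hC)
  have hveq := dist_eq R rr.toNat p.1 (by omega) hp1
  have hheq := dist_eq C cc.toNat p.2 (by omega) hp2
  unfold pvDist
  simp only []
  rw [← hveq, ← hheq, hrcast, hccast]
  omega

-- the two ports agree on every input satisfying Pre_
lemma ports_eq (g : List (List Int)) (hpre : Pre_find_closest_enemy g) :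
    find_closest_enemy g = find_closest_enemy_alt g := by
  obtain ⟨-, hplayer⟩ := hpre
  simp only [find_closest_enemy, find_closest_enemy_alt, scanA_spec, scanB_spec]
  set R := g.length with hRdef
  set C := if R > 0 then g.headI.length else 0 with hCdef
  set cells := pvCellsB R C with hcells
  set es := cells.filter (fun q => pvG g q == 2) with hes
  set F := cells.foldl (fun acc q => if pvG g q = 1 then some q else acc) none with hF
  have hiff : (cells.any (fun q => pvG g q == 2) = false) ↔ es = [] := by
    rw [hes, List.filter_eq_nil_iff, List.any_eq_false]
  by_cases hempty : es = []
  · rw [if_pos hempty, if_pos (by simp [hiff, hempty])]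
  · rw [if_neg hempty, if_neg (by simp [hiff, hempty])]
    -- the grid is nonempty in both directions
    obtain ⟨e0, he0⟩ := List.exists_mem_of_ne_nil es hempty
    have he0c : e0 ∈ cells := List.mem_of_mem_filter he0
    have he0v : pvG g e0 = 2 := by simpa using (List.mem_filter.mp he0).2
    have he0b := mem_pvCellsB.mp (by rw [hcells] at he0c; exact he0c)
    have hR0 : 0 < R := by omega
    have hC0 : 0 < C := by omega
    have hCval : C = g.headI.length := by rw [hCdef, if_pos hR0]
    -- the player exists: Pre_ provides a 1-cell, so the last-1 fold is some
    obtain ⟨r1, hr1, c1, hc1, h1v⟩ := hplayer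
      ⟨e0.1, List.mem_range.mpr he0b.1, e0.2, List.mem_range.mpr (by omega), he0v⟩
    rw [List.mem_range] at hr1
    rw [List.mem_range] at hc1
    have h1c : (r1, c1) ∈ cells := by
      rw [hcells]
      exact mem_pvCellsB.mpr ⟨hr1, by omega⟩
    have hFrev := lastfold_eq_rev_head g cells none
    have hfilne : cells.reverse.filter (fun q => pvG g q == 1) ≠ [] := by
      intro hnil
      have : (r1, c1) ∈ cells.reverse.filter (fun q => pvG g q == 1) :=
        List.mem_filter.mpr ⟨List.mem_reverse.mpr h1c, by simpa [pvG] using h1v⟩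
      rw [hnil] at this
      exact absurd this (List.not_mem_nil)
    obtain ⟨q, hq⟩ := List.exists_mem_of_ne_nil _ hfilne
    obtain ⟨qh, hqh⟩ : ∃ qh, (cells.reverse.filter (fun q => pvG g q == 1)).head? = some qh := by
      cases hx : (cells.reverse.filter (fun q => pvG g q == 1)).head? with
      | none => exact absurd (List.head?_eq_none_iff.mp hx) hfilne
      | some a => exact ⟨a, rfl⟩
    have hFq : F = some qh := by rw [hF, hFrev, hqh]; rfl
    have hqhmem : qh ∈ cells :=
      List.mem_reverse.mp (List.mem_of_mem_filter (List.mem_of_mem_head? hqh))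
    have hqb := mem_pvCellsB.mp (by rw [hcells] at hqhmem; exact hqhmem)
    rw [hFq]
    simp only [Option.getD_some]
    -- A's mapped distances are pvDist
    have hmapeq : es.map (fun e =>
        min (|(qh.2 : Int) - (e.2 : Int)|) ((C : Int) - |(qh.2 : Int) - (e.2 : Int)|)
        + min (|(qh.1 : Int) - (e.1 : Int)|) ((R : Int) - |(qh.1 : Int) - (e.1 : Int)|))
        = es.map (fun e => pvDist R C qh e) := by
      apply List.map_congr_left
      intro e _
      rw [pvDist]
    rw [hmapeq]
    -- the minimum distance
    obtain ⟨mm, hmm⟩ : ∃ mm, PySem.List.min? (es.map (fun e => pvDist R C qh e)) (fun x => x)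
        = some mm := by
      cases hx : PySem.List.min? (es.map (fun e => pvDist R C qh e)) (fun x => x) with
      | none =>
          have := (PySem.List.min?_eq_none_iff _ _).mp hx
          rw [List.map_eq_nil_iff] at this
          exact absurd this hempty
      | some a => exact ⟨a, rfl⟩
    have hmem := PySem.List.min?_mem hmm
    have hmin := PySem.List.min?_isMin hmm
    obtain ⟨em, hemes, hemv⟩ := List.mem_map.mp hmem
    have hemc : em ∈ cells := List.mem_of_mem_filter hemes
    have hem2 : pvG g em = 2 := by simpa using (List.mem_filter.mp hemes).2
    have hemb := mem_pvCellsB.mp (by rw [hcells] at hemc; exact hemc)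
    obtain ⟨hmm0, hmmRC⟩ : 0 ≤ mm ∧ mm ≤ (R : Int) + C := by
      rw [← hemv]
      exact pvDist_bounds R C qh em hqb.1 hqb.2 hemb.1 hemb.2
    -- the ring search stops exactly at mm
    have hhitmm : pvRingHit g R C qh.1 qh.2 mm.toNat = true := by
      have := hit_of_enemy g R C qh em hqb.1 hqb.2 hemb.1 hemb.2 hem2
      rwa [hemv] at this
    have hleast : ∀ dd, dd < mm.toNat → pvRingHit g R C qh.1 qh.2 dd = false := by
      intro dd hdd
      cases hx : pvRingHit g R C qh.1 qh.2 dd with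
      | false => rfl
      | true =>
          exfalso
          obtain ⟨e, he1, he2, hev, hed⟩ := enemy_of_hit g R C qh dd hqb.1 hqb.2 hx
          have hmemd : pvDist R C qh e ∈ es.map (fun e => pvDist R C qh e) :=
            List.mem_map.mpr ⟨e, List.mem_filter.mpr
              ⟨by rw [hcells]; exact mem_pvCellsB.mpr ⟨he1, he2⟩, by simp [hev]⟩, rfl⟩
          have := hmin _ hmemd
          simp only [] at this
          omega
    rw [find?_range_least (R + C + 1) _ mm.toNat (by omega) hhitmm hleast, hmm]
    simp [Int.toNat_of_nonneg hmm0]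


-- ===== VERDICT (by name: the statement is the Claim_ definition above) =====
theorem find_closest_enemy_spec : Claim_equal_find_closest_enemy := by
  intro g _ hpre
  unfold Spec_find_closest_enemy
  exact ports_eq g hpre
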